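-- pv_equiv track=rewrite | github.com/Krids/semeso23 | src/features/ratio_value_block_strategy.py | execute
-- ===== SOURCE A (Python) =====
-- from collections import defaultdict
-- from typing import Dict, List
--
-- def execute(data: List[Dict]) -> List[Dict]:
--     output_data = []
--
--     # Aggregate values for each block
--     block_values = defaultdict(int)
--     for transaction in data:
--         block_values[transaction['blockNumber']] += transaction['value']
--
--     for transaction in data:
--         transaction_copy = transaction.copy()
--         transaction_copy['value_per_block'] = block_values[transaction['blockNumber']]
--         output_data.append(transaction_copy)
--
--     return output_data
-- ===== SOURCE B (Python) =====
-- from typing import Dict, List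
--
-- def execute(data: List[Dict]) -> List[Dict]:
--     # Brute force: no aggregation dict; each row's total is computed by a
--     # direct scan over the whole list for rows of the same block.
--     return [
--         {**t, 'value_per_block': sum(u['value'] for u in data
--                                      if u['blockNumber'] == t['blockNumber'])}
--         for t in data
--     ]
-- ===== Notes on version B (the rewrite author's own statement) =====
-- stated objective: alternative
-- what changed: Drops A's defaultdict aggregation pass entirely: B is a single comprehension where each output row computes its block total by a direct nested scan (sum over rows with the same blockNumber), trading A's O(n) hash aggregation for a dict-free O(n^2) brute force.
import Mathlib
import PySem

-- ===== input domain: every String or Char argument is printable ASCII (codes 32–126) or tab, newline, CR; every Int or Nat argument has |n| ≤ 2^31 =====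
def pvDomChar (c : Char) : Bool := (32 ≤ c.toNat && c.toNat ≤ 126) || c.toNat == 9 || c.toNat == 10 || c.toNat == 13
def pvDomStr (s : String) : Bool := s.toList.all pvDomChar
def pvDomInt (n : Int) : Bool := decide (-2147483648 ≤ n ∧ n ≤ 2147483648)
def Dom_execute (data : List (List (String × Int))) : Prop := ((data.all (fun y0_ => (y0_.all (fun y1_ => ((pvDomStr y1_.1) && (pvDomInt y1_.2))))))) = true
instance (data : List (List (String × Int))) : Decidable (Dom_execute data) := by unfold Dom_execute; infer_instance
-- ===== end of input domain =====

-- B drops A's defaultdict aggregation pass: each output row computes its block total by a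
-- direct nested scan over the whole list (objective: alternative, dict-free; not faster).

-- ===== PORT A =====
def execute (data : List (List (String × Int))) : List (List (String × Int)) :=
  let block_values : PySem.Dict Int Int :=
    data.foldl (fun bv t =>
      let d := PySem.Dict.ofList t
      bv.modify (d.getD "blockNumber" 0) 0 (· + d.getD "value" 0)) PySem.Dict.empty
  data.foldl (fun out t =>
    let d := PySem.Dict.ofList t
    out ++ [((d.insert "value_per_block"
        (block_values.getD (d.getD "blockNumber" 0) 0)).items)]) []

-- ===== PORT B =====
-- `{**t, 'value_per_block': v}` = copy-then-insert; `sum(u['value'] for u in data if …)`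
-- = fold of + over the filtered list starting at 0.
def execute_alt (data : List (List (String × Int))) : List (List (String × Int)) :=
  data.map (fun t =>
    let d := PySem.Dict.ofList t
    (d.insert "value_per_block"
      ((data.filter (fun u =>
          (PySem.Dict.ofList u).getD "blockNumber" 0 == d.getD "blockNumber" 0)).foldl
        (fun s u => s + (PySem.Dict.ofList u).getD "value" 0) 0)).items)

-- ===== PRECONDITION & SPEC =====
-- Pre_ excludes exactly the transactions missing a 'blockNumber' or 'value' key, on which
-- Python A raises KeyError (B raises there too).
def Pre_execute (data : List (List (String × Int))) : Prop :=
  ∀ t ∈ data, "blockNumber" ∈ t.map Prod.fst ∧ "value" ∈ t.map Prod.fst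
instance (data : List (List (String × Int))) : Decidable (Pre_execute data) := by unfold Pre_execute; infer_instance

def pvWitness_execute : (List (List (String × Int))) :=
  [[("blockNumber", 1), ("value", 5)], [("blockNumber", 1), ("value", 7), ("gas", 2)]]

def Spec_execute (data : List (List (String × Int))) (out : List (List (String × Int))) : Prop := out = execute_alt data
instance (data : List (List (String × Int))) (out : List (List (String × Int))) : Decidable (Spec_execute data out) := by unfold Spec_execute; infer_instance

-- ===== CLAIM =====
def Claim_equal_execute : Prop := ∀ (data : List (List (String × Int))), Dom_execute data → Pre_execute data → Spec_execute data (execute data)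

-- ===== LEMMAS AND PROOFS =====

-- folding + over a list equals the accumulator plus the mapped sum
theorem foldl_add_eq_sum {α : Type} (f : α → Int) (l : List α) (a : Int) :
    l.foldl (fun s u => s + f u) a = a + (l.map f).sum := by
  induction l generalizing a with
  | nil => simp
  | cons x xs ih => simp [List.foldl, ih, add_assoc]

-- A's aggregation fold read back at key b is the sum of values of the rows with key b
theorem getD_foldl_modify_sum {α : Type} (key val : α → Int) (l : List α)
    (d : PySem.Dict Int Int) (b : Int) :
    (l.foldl (fun bv t => bv.modify (key t) 0 (· + val t)) d).getD b 0
      = d.getD b 0 + ((l.filter (fun u => key u == b)).map val).sum := by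
  induction l generalizing d with
  | nil => simp
  | cons t ts ih =>
    simp only [List.foldl, List.filter_cons]
    rw [ih]
    by_cases h : key t = b
    · simp [h, add_assoc]
    · simp [PySem.Dict.getD_modify, h, Ne.symm h]

-- ===== VERDICT =====
theorem execute_spec : Claim_equal_execute := by
  intro data _ _
  show execute data = execute_alt data
  unfold execute execute_alt
  dsimp only
  rw [PySem.List.foldl_append_singleton_eq_map]
  simp only [List.nil_append]
  apply List.map_congr_left
  intro t _
  have hb := getD_foldl_modify_sum
    (fun t => (PySem.Dict.ofList t).getD "blockNumber" 0)
    (fun t => (PySem.Dict.ofList t).getD "value" 0)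
    data PySem.Dict.empty ((PySem.Dict.ofList t).getD "blockNumber" 0)
  simp only [PySem.Dict.getD_empty, zero_add] at hb
  rw [hb, foldl_add_eq_sum, zero_add]
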